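-- pv_equiv track=rewrite | github.com/gamagamagama/dig | reader.py | find_sorted_positions
-- ===== SOURCE A (Python) =====
-- def find_sorted_positions(data, target):
--     positions = []
--     for y, row in enumerate(data):
--         for x, value in enumerate(row):
--             if value == target:
--                 positions.append((y, x))
--     # Sort by x first, then y
--     positions.sort(key=lambda pos: (pos[1], pos[0]))
--     return positions
-- ===== SOURCE B (Python) =====
-- def find_sorted_positions(data, target):
--     # Column-major scan: emits positions already in (x, y) order, so no sort is needed.
--     width = max((len(row) for row in data), default=0)
--     positions = []
--     for x in range(width):
--         for y in range(len(data)):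
--             row = data[y]
--             if x < len(row) and row[x] == target:
--                 positions.append((y, x))
--     return positions
-- ===== Notes on version B (the rewrite author's own statement) =====
-- stated objective: alternative
-- what changed: Replaced row-major collection followed by a sort keyed on (x, y) with a column-major double loop that emits the positions directly in (x, y) order, eliminating the sort.
import Mathlib
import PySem

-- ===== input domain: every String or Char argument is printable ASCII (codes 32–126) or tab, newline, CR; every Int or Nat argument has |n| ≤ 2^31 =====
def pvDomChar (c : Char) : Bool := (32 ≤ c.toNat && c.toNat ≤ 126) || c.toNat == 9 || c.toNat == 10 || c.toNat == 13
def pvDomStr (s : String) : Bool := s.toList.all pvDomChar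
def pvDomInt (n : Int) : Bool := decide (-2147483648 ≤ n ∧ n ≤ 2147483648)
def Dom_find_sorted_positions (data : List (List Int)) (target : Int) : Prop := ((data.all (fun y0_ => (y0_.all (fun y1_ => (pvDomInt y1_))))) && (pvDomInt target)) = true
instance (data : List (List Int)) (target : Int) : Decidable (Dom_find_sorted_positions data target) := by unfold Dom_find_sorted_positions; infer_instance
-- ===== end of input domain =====

-- B replaces A's row-major collect + sort keyed on (x, y) with a column-major scan that
-- emits the positions already in (x, y) order (objective: alternative algorithm, no sort).


-- ===== PORT A =====
def find_sorted_positions (data : List (List Int)) (target : Int) : List (Int × Int) :=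
  let positions : List (Int × Int) :=
    (PySem.List.enumerate data 0).foldl (fun positions yrow =>
      (PySem.List.enumerate yrow.2 0).foldl (fun positions xv =>
        if xv.2 == target then positions ++ [(yrow.1, xv.1)] else positions) positions) []
  PySem.List.sorted2 positions (fun p => p.2) (fun p => p.1) false

-- ===== PORT B =====
def find_sorted_positions_alt (data : List (List Int)) (target : Int) : List (Int × Int) :=
  let width : Int := (data.map (fun row => PySem.List.len row)).foldl max 0
  (PySem.List.pyRange 0 width).foldl (fun positions x =>
    (PySem.List.pyRange 0 (PySem.List.len data)).foldl (fun positions y =>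
      let row := PySem.List.pyGetD data y []
      if decide (x < PySem.List.len row) && (PySem.List.pyGetD row x 0 == target)
      then positions ++ [(y, x)] else positions) positions) []

-- ===== PRECONDITION & SPEC =====
def Spec_find_sorted_positions (data : List (List Int)) (target : Int) (out : List (Int × Int)) : Prop := out = find_sorted_positions_alt data target
instance (data : List (List Int)) (target : Int) (out : List (Int × Int)) : Decidable (Spec_find_sorted_positions data target out) := by unfold Spec_find_sorted_positions; infer_instance

-- ===== CLAIM (what is proved, stated in full; the proofs are below) =====
def Claim_equal_find_sorted_positions : Prop := ∀ (data : List (List Int)) (target : Int), Dom_find_sorted_positions data target → Spec_find_sorted_positions data target (find_sorted_positions data target)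

-- ===== LEMMAS AND PROOFS =====

-- PySem.List.sorted2 is PySem.List.sorted with the lexicographic product key.
theorem sorted2_eq_sorted_toLex {α : Type} (xs : List α) (k1 k2 : α → Int) :
    PySem.List.sorted2 xs k1 k2 false = PySem.List.sorted xs (fun a => toLex (k1 a, k2 a)) false := by
  have hfun : (fun (a b : α) => decide (k1 a < k1 b) || (!decide (k1 b < k1 a) && decide (k2 a < k2 b)))
      = (fun a b => decide ((toLex (k1 a, k2 a) : Int ×ₗ Int) < toLex (k1 b, k2 b))) := by
    funext a b
    simp only [Prod.Lex.toLex_lt_toLex]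
    rcases lt_trichotomy (k1 a) (k1 b) with h | h | h
    · simp [h, not_lt.mpr h.le]
    · simp [h]
    · simp [h, h.not_gt, h.ne']
  simp only [PySem.List.sorted2, PySem.List.sorted, hfun, Bool.false_eq_true, if_false]

-- the list A collects before sorting, in flatMap form
def posA (data : List (List Int)) (target : Int) : List (Int × Int) :=
  (PySem.List.enumerate data 0).flatMap (fun yrow =>
    ((PySem.List.enumerate yrow.2 0).filter (fun xv => xv.2 == target)).map (fun xv => (yrow.1, xv.1)))

-- the width B computes, and the list B produces, in flatMap form
def widthB (data : List (List Int)) : Int := (data.map (fun row => PySem.List.len row)).foldl max 0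

def posB (data : List (List Int)) (target : Int) : List (Int × Int) :=
  (PySem.List.pyRange 0 (widthB data)).flatMap (fun x =>
    ((PySem.List.pyRange 0 (PySem.List.len data)).filter (fun y =>
      decide (x < PySem.List.len (PySem.List.pyGetD data y [])) && (PySem.List.pyGetD (PySem.List.pyGetD data y []) x 0 == target))).map (fun y => (y, x)))

theorem portA_eq (data : List (List Int)) (target : Int) :
    find_sorted_positions data target = PySem.List.sorted2 (posA data target) (fun p => p.2) (fun p => p.1) false := by
  unfold find_sorted_positions posA
  have hfun : (fun (positions : List (Int × Int)) (yrow : Int × List Int) =>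
      (PySem.List.enumerate yrow.2 0).foldl (fun positions xv =>
        if xv.2 == target then positions ++ [(yrow.1, xv.1)] else positions) positions)
      = (fun positions yrow => positions ++
          ((PySem.List.enumerate yrow.2 0).filter (fun xv => xv.2 == target)).map (fun xv => (yrow.1, xv.1))) := by
    funext positions yrow
    exact PySem.List.foldl_append_if _ _ _ _
  rw [hfun, PySem.List.foldl_append_eq_flatMap]
  simp

theorem portB_eq (data : List (List Int)) (target : Int) :
    find_sorted_positions_alt data target = posB data target := by
  unfold find_sorted_positions_alt posB widthB
  have hfun : (fun (positions : List (Int × Int)) (x : Int) =>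
      (PySem.List.pyRange 0 (PySem.List.len data)).foldl (fun positions y =>
        let row := PySem.List.pyGetD data y []
        if decide (x < PySem.List.len row) && (PySem.List.pyGetD row x 0 == target)
        then positions ++ [(y, x)] else positions) positions)
      = (fun positions x => positions ++
          ((PySem.List.pyRange 0 (PySem.List.len data)).filter (fun y =>
            decide (x < PySem.List.len (PySem.List.pyGetD data y [])) && (PySem.List.pyGetD (PySem.List.pyGetD data y []) x 0 == target))).map (fun y => (y, x))) := by
    funext positions x
    exact PySem.List.foldl_append_if _ _ _ _
  rw [hfun, PySem.List.foldl_append_eq_flatMap]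
  simp

-- shared membership characterisation: p is a position of target in the grid
def Occ (data : List (List Int)) (target : Int) (p : Int × Int) : Prop :=
  ∃ (k j : Nat) (hk : k < data.length) (hj : j < data[k].length),
    p = ((k : Int), (j : Int)) ∧ data[k][j] = target

theorem memA (data : List (List Int)) (target : Int) (p : Int × Int) :
    p ∈ posA data target ↔ Occ data target p := by
  unfold posA Occ
  simp only [List.mem_flatMap, List.mem_map, List.mem_filter, PySem.List.mem_enumerate_iff]
  constructor
  · rintro ⟨yrow, ⟨k, hk, rfl⟩, xv, ⟨⟨j, hj, rfl⟩, ht⟩, rfl⟩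
    simp only at hj ht ⊢
    exact ⟨k, j, hk, hj, by simp, by simpa using ht⟩
  · rintro ⟨k, j, hk, hj, rfl, ht⟩
    refine ⟨(0 + (k : Int), data[k]), ⟨k, hk, rfl⟩, (0 + (j : Int), data[k][j]), ⟨⟨j, hj, rfl⟩, by simpa using ht⟩, by simp⟩

theorem len_le_widthB {data : List (List Int)} {row : List Int} (h : row ∈ data) :
    PySem.List.len row ≤ widthB data :=
  (PySem.List.le_foldl_max (data.map (fun row => PySem.List.len row)) 0).2 _ (List.mem_map_of_mem h)

theorem getD_int (data : List (List Int)) {y : Int} (h0 : 0 ≤ y) (h1 : y.toNat < data.length) :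
    PySem.List.pyGetD data y [] = data[y.toNat] := by
  rw [PySem.List.pyGetD_of_nonneg _ _ h0, List.getD_eq_getElem _ _ h1]

theorem getD_int' (row : List Int) {x : Int} (h0 : 0 ≤ x) (h1 : x.toNat < row.length) :
    PySem.List.pyGetD row x 0 = row[x.toNat] := by
  rw [PySem.List.pyGetD_of_nonneg _ _ h0, List.getD_eq_getElem _ _ h1]

theorem memB (data : List (List Int)) (target : Int) (p : Int × Int) :
    p ∈ posB data target ↔ Occ data target p := by
  unfold posB Occ
  simp only [List.mem_flatMap, List.mem_map, List.mem_filter, PySem.List.mem_pyRange_one,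
    Bool.and_eq_true, decide_eq_true_eq, beq_iff_eq, PySem.List.len_eq]
  constructor
  · rintro ⟨x, ⟨hx0, hxw⟩, y, ⟨⟨hy0, hyl⟩, hxr, ht⟩, rfl⟩
    have hk : y.toNat < data.length := by omega
    rw [getD_int data hy0 hk] at hxr ht
    have hj : x.toNat < data[y.toNat].length := by
      have := hxr; omega
    rw [getD_int' _ hx0 hj] at ht
    exact ⟨y.toNat, x.toNat, hk, hj, by simp [hx0, hy0], ht⟩
  · rintro ⟨k, j, hk, hj, rfl, ht⟩
    have hrow : data[k] ∈ data := List.getElem_mem hk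
    have hw : ((data[k].length : Int)) ≤ widthB data := by
      simpa using len_le_widthB hrow
    refine ⟨(j : Int), ⟨by positivity, by omega⟩, (k : Int), ⟨⟨by positivity, by omega⟩, ?_, ?_⟩, rfl⟩
    · rw [getD_int data (by positivity) (by simpa using hk)]; simpa using hj
    · rw [getD_int data (by positivity) (by simpa using hk), getD_int' _ (by positivity) (by simpa using hj)]
      simpa using ht

theorem pairwiseB (data : List (List Int)) (target : Int) :
    (posB data target).Pairwise (fun a b => (toLex (a.2, a.1) : Int ×ₗ Int) < toLex (b.2, b.1)) := by
  unfold posB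
  rw [List.pairwise_flatMap]
  constructor
  · intro x _
    rw [List.pairwise_map]
    refine List.Pairwise.imp ?_ (List.Pairwise.sublist List.filter_sublist (PySem.List.pairwise_lt_pyRange_one 0 _))
    intro y1 y2 h
    exact Prod.Lex.toLex_lt_toLex.mpr (Or.inr ⟨rfl, h⟩)
  · refine List.Pairwise.imp ?_ (PySem.List.pairwise_lt_pyRange_one 0 _)
    rintro x1 x2 h a ha b hb
    simp only [List.mem_map] at ha hb
    obtain ⟨y1, -, rfl⟩ := ha
    obtain ⟨y2, -, rfl⟩ := hb
    exact Prod.Lex.toLex_lt_toLex.mpr (Or.inl h)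

theorem pairwiseA (data : List (List Int)) (target : Int) :
    (posA data target).Pairwise (fun a b => (toLex (a.1, a.2) : Int ×ₗ Int) < toLex (b.1, b.2)) := by
  unfold posA
  rw [List.pairwise_flatMap]
  constructor
  · intro yrow _
    rw [List.pairwise_map]
    refine List.Pairwise.imp ?_ (List.Pairwise.sublist List.filter_sublist (PySem.List.pairwise_lt_enumerate _ 0))
    intro a b h
    exact Prod.Lex.toLex_lt_toLex.mpr (Or.inr ⟨rfl, h⟩)
  · refine List.Pairwise.imp ?_ (PySem.List.pairwise_lt_enumerate _ 0)
    rintro yr1 yr2 h a ha b hb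
    simp only [List.mem_map] at ha hb
    obtain ⟨v1, -, rfl⟩ := ha
    obtain ⟨v2, -, rfl⟩ := hb
    exact Prod.Lex.toLex_lt_toLex.mpr (Or.inl h)

theorem nodup_of_pairwise_lt {α κ : Type} [LinearOrder κ] {l : List α} {key : α → κ}
    (h : l.Pairwise (fun a b => key a < key b)) : l.Nodup :=
  h.imp (fun hlt => by rintro rfl; exact absurd hlt (lt_irrefl _))

theorem permBA (data : List (List Int)) (target : Int) : (posB data target).Perm (posA data target) :=
  (List.perm_ext_iff_of_nodup (nodup_of_pairwise_lt (pairwiseB data target))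
    (nodup_of_pairwise_lt (pairwiseA data target))).mpr
    (fun p => (memB data target p).trans (memA data target p).symm)

-- ===== VERDICT (by name: the statement is the Claim_ definition above) =====
theorem find_sorted_positions_spec : Claim_equal_find_sorted_positions := by
  intro data target _
  unfold Spec_find_sorted_positions
  rw [portA_eq, portB_eq, sorted2_eq_sorted_toLex]
  exact PySem.List.sorted_eq_of_perm_of_pairwise_lt _ _ _ (permBA data target) (pairwiseB data target)
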